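-- pv_equiv track=rewrite | github.com/optcom-org/optcom | optcom/utils/plot.py | get_graph_layout
-- ===== SOURCE A (Python) =====
-- from typing import Any, Dict, List, Optional, Tuple, Union
--
-- def get_graph_layout(plot_groups: Optional[List[int]], split: bool, length: int
--                      ) -> Tuple[List[List[int]], int]:
--     nbr_graphs: int = 0
--     graphs: List[List[int]] = []
--     if (plot_groups is not None):
--         nbr_graphs = max(plot_groups) + 1
--         graphs = [[] for i in range(nbr_graphs)]
--         for i in range(len(plot_groups)):
--             graphs[plot_groups[i]].append(i)
--     else:
--         if (split):
--             nbr_graphs = length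
--             graphs = [[i] for i in range(length)]
--         else:
--             nbr_graphs = 1
--             graphs = [[i for i in range(length)]]
--
--     return graphs, nbr_graphs
-- ===== SOURCE B (Python) =====
-- def get_graph_layout(plot_groups, split, length):
--     # Unified table-driven shape: pick (n, key, k) per case, then build every
--     # bucket j by one scan of the indices selecting those with key(i) == j.
--     if plot_groups is not None:
--         n, key, k = len(plot_groups), plot_groups.__getitem__, max(plot_groups) + 1
--     elif split:
--         n, key, k = length, (lambda i: i), length
--     else:
--         n, key, k = length, (lambda i: 0), 1
--     return [[i for i in range(n) if key(i) == j] for j in range(k)], k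
-- ===== Notes on version B (the rewrite author's own statement) =====
-- stated objective: alternative
-- what changed: All three cases are reduced to one table-driven bucket builder: a (size, key, group-count) triple is chosen per case and every bucket j is produced by a per-group scan of the indices (O(n*k)), replacing A's allocate-then-scatter mutating pass and its two bespoke comprehension branches.
-- outside the precondition, e.g. on get_graph_layout([0, -1], False, 0): A returns ([[0, 1]], 1), B returns ([[0]], 1); on get_graph_layout([], False, 3): A raises ValueError, B raises ValueError
import Mathlib
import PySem

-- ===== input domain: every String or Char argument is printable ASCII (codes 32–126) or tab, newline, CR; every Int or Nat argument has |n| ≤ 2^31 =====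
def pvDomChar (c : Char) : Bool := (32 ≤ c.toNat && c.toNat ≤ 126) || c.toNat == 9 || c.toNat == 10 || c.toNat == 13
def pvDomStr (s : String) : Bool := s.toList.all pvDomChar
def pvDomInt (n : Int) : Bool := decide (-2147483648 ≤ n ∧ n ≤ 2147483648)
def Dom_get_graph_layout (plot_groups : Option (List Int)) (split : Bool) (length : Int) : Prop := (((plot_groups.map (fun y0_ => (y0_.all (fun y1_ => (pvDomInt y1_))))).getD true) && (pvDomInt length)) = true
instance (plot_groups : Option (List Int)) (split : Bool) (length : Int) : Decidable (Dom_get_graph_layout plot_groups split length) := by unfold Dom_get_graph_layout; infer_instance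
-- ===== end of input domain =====

-- B reduces all three cases to one table-driven bucket builder (a (size, key, count)
-- triple plus a per-group index scan) instead of A's three bespoke branches; objective:
-- alternative, not faster.

-- ===== PORT A =====
def get_graph_layout (plot_groups : Option (List Int)) (split : Bool) (length : Int) : List (List Int) × Int :=
  match plot_groups with
  | some pg =>
    -- nbr_graphs = max(plot_groups) + 1  (max of [] raises ValueError: excluded by Pre_)
    let nbr : Int := ((PySem.List.max? pg (fun x => x)).getD 0) + 1
    -- graphs = [[] for i in range(nbr_graphs)]
    let graphs0 : List (List Int) := (PySem.List.pyRange 0 nbr 1).map (fun _ => ([] : List Int))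
    -- for i in range(len(plot_groups)): graphs[plot_groups[i]].append(i)
    -- (pyGetD/pySetD wrap negative indices exactly as Python; in range under Pre_)
    let graphs := (PySem.List.pyRange 0 (pg.length : Int) 1).foldl
      (fun gs i =>
        let g := PySem.List.pyGetD pg i 0
        PySem.List.pySetD gs g (PySem.List.pyGetD gs g [] ++ [i])) graphs0
    (graphs, nbr)
  | none =>
    if split then
      ((PySem.List.pyRange 0 length 1).map (fun i => [i]), length)
    else
      ([PySem.List.pyRange 0 length 1], 1)

-- ===== PORT B =====
-- [[i for i in range(n) if key(i) == j] for j in range(k)]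
def pvBuckets (n k : Int) (key : Int → Int) : List (List Int) :=
  (PySem.List.pyRange 0 k 1).map (fun j =>
    (PySem.List.pyRange 0 n 1).filter (fun i => key i == j))

def get_graph_layout_alt (plot_groups : Option (List Int)) (split : Bool) (length : Int) : List (List Int) × Int :=
  -- pick the (n, key, k) triple per case, then one shared bucket builder
  let t : Int × (Int → Int) × Int :=
    match plot_groups with
    | some pg => ((pg.length : Int), fun i => PySem.List.pyGetD pg i 0,
                  ((PySem.List.max? pg (fun x => x)).getD 0) + 1)
    | none => if split then (length, fun i => i, length)
              else (length, fun _ => (0 : Int), 1)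
  (pvBuckets t.1 t.2.2 t.2.1, t.2.2)

-- ===== PRECONDITION & SPEC =====
-- Pre_ excludes, when plot_groups is given, the empty list (A raises ValueError on max([]))
-- and lists containing negative group ids — outside the natural domain of group indices —
-- where A raises IndexError or accidentally scatters the index by negative-index wraparound.
def Pre_get_graph_layout (plot_groups : Option (List Int)) (split : Bool) (length : Int) : Prop :=
  plot_groups ≠ some [] ∧ ∀ e ∈ plot_groups.getD [], 0 ≤ e
instance (plot_groups : Option (List Int)) (split : Bool) (length : Int) : Decidable (Pre_get_graph_layout plot_groups split length) := by unfold Pre_get_graph_layout; infer_instance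

def pvWitness_get_graph_layout : Option (List Int) × Bool × Int := (some [1, 0, 1], true, 0)

def Spec_get_graph_layout (plot_groups : Option (List Int)) (split : Bool) (length : Int) (out : List (List Int) × Int) : Prop := out = get_graph_layout_alt plot_groups split length
instance (plot_groups : Option (List Int)) (split : Bool) (length : Int) (out : List (List Int) × Int) : Decidable (Spec_get_graph_layout plot_groups split length out) := by unfold Spec_get_graph_layout; infer_instance

-- ===== CLAIM (what is proved, stated in full; the proofs are below) =====
def Claim_equal_get_graph_layout : Prop := ∀ (plot_groups : Option (List Int)) (split : Bool) (length : Int), Dom_get_graph_layout plot_groups split length → Pre_get_graph_layout plot_groups split length → Spec_get_graph_layout plot_groups split length (get_graph_layout plot_groups split length)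

-- ===== LEMMAS AND PROOFS =====

-- A's scatter loop, for in-range keys, equals appending each bucket's filtered indices.
theorem pv_foldl_scatter (f : Int → Int) (is : List Int) (gs : List (List Int))
    (h : ∀ i ∈ is, 0 ≤ f i ∧ f i < (gs.length : Int)) :
    is.foldl (fun gs i => PySem.List.pySetD gs (f i) (PySem.List.pyGetD gs (f i) [] ++ [i])) gs
      = gs.mapIdx (fun j b => b ++ is.filter (fun i => f i == (j : Int))) := by
  induction is generalizing gs with
  | nil =>
    simp only [List.foldl_nil, List.filter_nil, List.append_nil]
    apply List.ext_getElem <;> simp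
  | cons i is ih =>
    obtain ⟨h0, h1⟩ := h i (by simp)
    have ht : (f i).toNat < gs.length := by omega
    have hstep : PySem.List.pySetD gs (f i) (PySem.List.pyGetD gs (f i) [] ++ [i])
        = gs.set (f i).toNat (gs[(f i).toNat] ++ [i]) := by
      rw [PySem.List.pySetD_of_nonneg _ _ h0,
        PySem.List.pyGetD_eq_getElem _ _ h0 h1]
    rw [List.foldl_cons, hstep, ih _ (by
      intro x hx
      have := h x (by simp [hx])
      simpa using this)]
    apply List.ext_getElem
    · simp
    · intro k hk hk'
      simp only [List.getElem_mapIdx, List.getElem_set] at *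
      by_cases hkt : (f i).toNat = k
      · have : f i == (k : Int) := by simp [← hkt]; omega
        simp [hkt, this]
      · have : (f i == (k : Int)) = false := by
          simp; omega
        simp [hkt, this]

-- filtering a duplicate-free range for one of its members yields the singleton
theorem pv_filter_range_eq_singleton (a b j : Int) (hj : a ≤ j) (hj' : j < b) :
    (PySem.List.pyRange a b 1).filter (fun i => i == j) = [j] := by
  rw [List.filter_beq]
  have hmem : j ∈ PySem.List.pyRange a b 1 := (PySem.List.mem_pyRange_one).mpr ⟨hj, hj'⟩
  have := List.count_eq_one_of_mem (PySem.List.nodup_pyRange_one a b) hmem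
  simp [this]

-- ===== VERDICT (by name: the statement is the Claim_ definition above) =====
theorem get_graph_layout_spec : Claim_equal_get_graph_layout := by
  intro plot_groups split length _ hpre
  unfold Spec_get_graph_layout get_graph_layout get_graph_layout_alt
  match plot_groups with
  | none =>
    by_cases hs : split
    · subst hs
      simp only [pvBuckets, if_true]
      refine Prod.ext ?_ rfl
      apply List.ext_getElem
      · simp [PySem.List.length_pyRange_one]
      · intro k hk hk'
        simp only [List.getElem_map, PySem.List.getElem_pyRange_one]
        rw [pv_filter_range_eq_singleton 0 length ((0 : Int) + k)
          (by omega) (by simp [PySem.List.length_pyRange_one] at hk; omega)]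
    · have hs' : split = false := by simpa using hs
      subst hs'
      simp only [pvBuckets, if_false, Bool.false_eq_true]
      have h01 : PySem.List.pyRange 0 1 1 = [0] := by decide
      simp [h01]
  | some pg =>
    obtain ⟨hne', hnn'⟩ := hpre
    have hne : pg ≠ [] := fun h => hne' (by simp [h])
    have hnn : ∀ e ∈ pg, 0 ≤ e := by simpa using hnn'
    simp only [pvBuckets]
    set m : Int := (PySem.List.max? pg (fun x => x)).getD 0 with hm
    have hmax : ∃ v, PySem.List.max? pg (fun x => x) = some v := by
      rcases hv : PySem.List.max? pg (fun x => x) with _ | v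
      · exact absurd ((PySem.List.max?_eq_none_iff pg _).mp hv) hne
      · exact ⟨v, rfl⟩
    obtain ⟨v, hv⟩ := hmax
    have hle : ∀ y ∈ pg, y ≤ m := by
      intro y hy
      have := PySem.List.max?_isMax hv y hy
      simp [hm, hv]; simpa using this
    have hm0 : 0 ≤ m := by
      rcases pg with _ | ⟨a, pg'⟩
      · exact absurd rfl hne
      · exact le_trans (hnn a (by simp)) (hle a (by simp))
    have hlen0 : ((PySem.List.pyRange 0 (m + 1) 1).map (fun _ => ([] : List Int))).length
        = (m + 1).toNat := by
      simp [PySem.List.length_pyRange_one]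
    have hkey : ∀ i ∈ PySem.List.pyRange 0 (pg.length : Int) 1,
        0 ≤ PySem.List.pyGetD pg i 0 ∧
        PySem.List.pyGetD pg i 0 < (((PySem.List.pyRange 0 (m + 1) 1).map (fun _ => ([] : List Int))).length : Int) := by
      intro i hi
      rw [PySem.List.mem_pyRange_one] at hi
      have hmem : PySem.List.pyGetD pg i 0 ∈ pg :=
        PySem.List.pyGetD_mem _ _ (by simp [PySem.Raise.InRange]; omega)
      refine ⟨hnn _ hmem, ?_⟩
      have := hle _ hmem
      rw [hlen0]; omega
    rw [pv_foldl_scatter (fun i => PySem.List.pyGetD pg i 0) _ _ hkey]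
    refine Prod.ext ?_ rfl
    apply List.ext_getElem
    · simp [PySem.List.length_pyRange_one]
    · intro k hk hk'
      simp only [List.getElem_mapIdx, List.getElem_map]
      rw [PySem.List.getElem_pyRange_one]
      simp
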